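-- pv_equiv track=rewrite | github.com/Glenanddd/few_shot_prompting_tkgr | reasoning.py | _build_other_answers_map
-- ===== SOURCE A (Python) =====
-- def _build_other_answers_map(test_data_np):
--     mp = {}
--     for row in test_data_np:
--         s = int(row[0])
--         r = int(row[1])
--         o = int(row[2])
--         t = int(row[3])
--         key = (s, r, t)
--         mp.setdefault(key, []).append(o)
--     return mp
-- ===== SOURCE B (Python) =====
-- def _build_other_answers_map(test_data_np):
--     rows = [(int(r[0]), int(r[1]), int(r[3]), int(r[2])) for r in test_data_np]
--     keys = dict.fromkeys((s, rl, t) for (s, rl, t, _o) in rows)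
--     return {k: [o for (s, rl, t, o) in rows if (s, rl, t) == k] for k in keys}
-- ===== Notes on version B (the rewrite author's own statement) =====
-- stated objective: alternative
-- what changed: Replaces A's single-pass setdefault-dict accumulation with a two-pass scheme: collect the distinct (s,r,t) keys in first-occurrence order via dict.fromkeys, then build each group with one filtering comprehension over the rows.
import Mathlib
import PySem

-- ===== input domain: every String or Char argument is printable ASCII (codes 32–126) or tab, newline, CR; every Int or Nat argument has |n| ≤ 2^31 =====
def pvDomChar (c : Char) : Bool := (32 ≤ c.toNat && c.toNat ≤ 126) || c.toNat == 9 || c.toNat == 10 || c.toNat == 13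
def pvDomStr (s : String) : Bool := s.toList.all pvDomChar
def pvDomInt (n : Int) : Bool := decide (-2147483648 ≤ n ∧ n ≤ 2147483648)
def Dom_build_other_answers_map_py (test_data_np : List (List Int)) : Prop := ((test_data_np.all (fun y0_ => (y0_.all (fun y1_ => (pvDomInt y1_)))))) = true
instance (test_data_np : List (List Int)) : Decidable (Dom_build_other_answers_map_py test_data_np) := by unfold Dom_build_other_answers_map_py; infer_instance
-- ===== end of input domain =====

-- B replaces A's single-pass setdefault-dict grouping by a two-pass scheme (ordered distinct
-- keys first, then one per-key collection pass); alternative decomposition, not claimed faster.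

-- ===== PORT A =====
-- literal port of A: one dict built by setdefault(key, []).append(o) over the rows
-- (row[i] is PySem.List.pyGetD row i 0; Pre_ guarantees the index is in range, so the
-- default is never read — Python raises IndexError exactly on the inputs Pre_ excludes)
def build_other_answers_map_py (test_data_np : List (List Int)) : List (Int × Int × Int × List Int) :=
  let mp := test_data_np.foldl (fun mp row =>
    let s := PySem.List.pyGetD row 0 0
    let r := PySem.List.pyGetD row 1 0
    let o := PySem.List.pyGetD row 2 0
    let t := PySem.List.pyGetD row 3 0
    mp.modify (s, r, t) [] (fun v => v ++ [o])) PySem.Dict.empty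
  mp.items.map (fun p => (p.1.1, p.1.2.1, p.1.2.2, p.2))

-- ===== PORT B =====
-- literal port of B (Source B): rows of (s, r, t, o) tuples, ordered distinct keys via
-- dict.fromkeys (= PySem.List.dedup), then one filtering comprehension per key
def build_other_answers_map_py_alt (test_data_np : List (List Int)) : List (Int × Int × Int × List Int) :=
  let rows := test_data_np.map (fun r =>
    (PySem.List.pyGetD r 0 0, PySem.List.pyGetD r 1 0, PySem.List.pyGetD r 3 0, PySem.List.pyGetD r 2 0))
  let keys := PySem.List.dedup (rows.map (fun q => (q.1, q.2.1, q.2.2.1)))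
  keys.map (fun k =>
    (k.1, k.2.1, k.2.2, (rows.filter (fun q => (q.1, q.2.1, q.2.2.1) == k)).map (fun q => q.2.2.2)))

-- ===== PRECONDITION & SPEC =====
-- Pre_ excludes exactly the inputs on which Python A raises IndexError: a row shorter than 4
def Pre_build_other_answers_map_py (test_data_np : List (List Int)) : Prop :=
  ∀ row ∈ test_data_np, 4 ≤ row.length
instance (test_data_np : List (List Int)) : Decidable (Pre_build_other_answers_map_py test_data_np) := by unfold Pre_build_other_answers_map_py; infer_instance
def pvWitness_build_other_answers_map_py : List (List Int) := [[1, 2, 3, 4], [1, 2, 5, 4]]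
def Spec_build_other_answers_map_py (test_data_np : List (List Int)) (out : List (Int × Int × Int × List Int)) : Prop := out = build_other_answers_map_py_alt test_data_np
instance (test_data_np : List (List Int)) (out : List (Int × Int × Int × List Int)) : Decidable (Spec_build_other_answers_map_py test_data_np out) := by unfold Spec_build_other_answers_map_py; infer_instance

-- ===== CLAIM (what is proved, stated in full; the proofs are below) =====
def Claim_equal_build_other_answers_map_py : Prop := ∀ (test_data_np : List (List Int)), Dom_build_other_answers_map_py test_data_np → Pre_build_other_answers_map_py test_data_np → Spec_build_other_answers_map_py test_data_np (build_other_answers_map_py test_data_np)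

-- ===== LEMMAS AND PROOFS =====

-- the (s, r, t) key and the o value both programs extract from a row
def pvKeyOf (row : List Int) : Int × Int × Int :=
  (PySem.List.pyGetD row 0 0, PySem.List.pyGetD row 1 0, PySem.List.pyGetD row 3 0)
def pvValOf (row : List Int) : Int := PySem.List.pyGetD row 2 0

-- the common closed form both ports are reduced to
def pvGrouped (xs : List (List Int)) : List (Int × Int × Int × List Int) :=
  (PySem.List.dedup (xs.map pvKeyOf)).map (fun k =>
    (k.1, k.2.1, k.2.2, (xs.filter (fun r => pvKeyOf r == k)).map pvValOf))

-- A's grouping loop, rewritten as a fold over (key, value) pairs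
theorem pvA_fold_eq (xs : List (List Int)) :
    xs.foldl (fun mp row =>
      mp.modify (PySem.List.pyGetD row 0 0, PySem.List.pyGetD row 1 0, PySem.List.pyGetD row 3 0)
        [] (fun v => v ++ [PySem.List.pyGetD row 2 0])) PySem.Dict.empty
    = (xs.map (fun r => (pvKeyOf r, pvValOf r))).foldl
        (fun d p => d.modify p.1 [] (fun v => v ++ [p.2])) PySem.Dict.empty := by
  rw [List.foldl_map]
  rfl

theorem pvA_closed (xs : List (List Int)) :
    build_other_answers_map_py xs = pvGrouped xs := by
  simp only [build_other_answers_map_py]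
  rw [pvA_fold_eq]
  have hnd : ((xs.map (fun r => (pvKeyOf r, pvValOf r))).foldl
      (fun d p => d.modify p.1 [] (fun v => v ++ [p.2])) PySem.Dict.empty).keys.Nodup :=
    PySem.Dict.nodup_keys_foldl_modify_key (xs.map (fun r => (pvKeyOf r, pvValOf r)))
      (fun p : (Int × Int × Int) × Int => p.1) []
      (fun _ p => fun v => v ++ [p.2]) PySem.Dict.empty (by simp [PySem.Dict.keys_empty])
  have hk : ((xs.map (fun r => (pvKeyOf r, pvValOf r))).foldl
      (fun d p => d.modify p.1 [] (fun v => v ++ [p.2])) PySem.Dict.empty).keys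
      = PySem.Set.update PySem.Dict.empty.keys
          ((xs.map (fun r => (pvKeyOf r, pvValOf r))).map (fun p : (Int × Int × Int) × Int => p.1)) :=
    PySem.Dict.keys_foldl_modify_key (xs.map (fun r => (pvKeyOf r, pvValOf r)))
      (fun p : (Int × Int × Int) × Int => p.1) []
      (fun _ p => fun v => v ++ [p.2]) PySem.Dict.empty
  rw [PySem.Dict.items_eq_map_keys _ hnd [], hk]
  have hkeys : PySem.Set.update (PySem.Dict.empty : PySem.Dict (Int × Int × Int) (List Int)).keys
        ((xs.map (fun r => (pvKeyOf r, pvValOf r))).map (fun p : (Int × Int × Int) × Int => p.1))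
      = PySem.List.dedup (xs.map pvKeyOf) := by
    rw [List.map_map]; rfl
  rw [hkeys, List.map_map]
  unfold pvGrouped
  apply List.map_congr_left
  intro k _
  have hg := PySem.Dict.getD_foldl_modify_append
      (xs.map (fun r => (pvKeyOf r, pvValOf r))) PySem.Dict.empty k
  simp only [PySem.Dict.getD_empty, List.nil_append] at hg
  simp only [Function.comp_apply, hg]
  refine congrArg (fun v => (k.1, k.2.1, k.2.2, v)) ?_
  rw [List.filter_map, List.map_map]
  rfl

theorem pvB_closed (xs : List (List Int)) :
    build_other_answers_map_py_alt xs = pvGrouped xs := by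
  simp only [build_other_answers_map_py_alt, pvGrouped, List.map_map, List.filter_map]
  rfl

-- ===== VERDICT (by name: the statement is the Claim_ definition above) =====
theorem build_other_answers_map_py_spec : Claim_equal_build_other_answers_map_py := by
  intro xs _ _
  show build_other_answers_map_py xs = build_other_answers_map_py_alt xs
  rw [pvA_closed, pvB_closed]
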